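-- pv_equiv track=rewrite | github.com/ENKI-420/Q-slice-redteam-arena | src/agents/aura/autopoietic_observer.py | _deduce_intent
-- ===== SOURCE A (Python) =====
-- from typing import Dict, List, Optional, Any
--
-- def _deduce_intent(text: str, key_concepts: List[str]) -> str:
--     """
--     Deduce user intent from text and key concepts
--
--     Simple implementation: categorize based on keywords
--     In a real system, this would use advanced NLP/ML
--     """
--     text_lower = text.lower()
--
--     # Intent categories
--     if any(word in text_lower for word in ['create', 'build', 'make', 'generate']):
--         intent_category = "creation"
--     elif any(word in text_lower for word in ['analyze', 'examine', 'understand', 'explain']):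
--         intent_category = "analysis"
--     elif any(word in text_lower for word in ['fix', 'correct', 'debug', 'resolve']):
--         intent_category = "correction"
--     elif any(word in text_lower for word in ['optimize', 'improve', 'enhance', 'refine']):
--         intent_category = "optimization"
--     elif any(word in text_lower for word in ['test', 'validate', 'verify', 'check']):
--         intent_category = "validation"
--     else:
--         intent_category = "general_inquiry"
--
--     # Construct intent statement
--     if key_concepts:
--         concepts_str = ", ".join(key_concepts[:3])
--         return f"User intends {intent_category} regarding: {concepts_str}"
--     else:
--         return f"User intends {intent_category}"
-- ===== SOURCE B (Python) =====
-- _KEYWORD_PRIORITY = {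
--     'create': 0, 'build': 0, 'make': 0, 'generate': 0,
--     'analyze': 1, 'examine': 1, 'understand': 1, 'explain': 1,
--     'fix': 2, 'correct': 2, 'debug': 2, 'resolve': 2,
--     'optimize': 3, 'improve': 3, 'enhance': 3, 'refine': 3,
--     'test': 4, 'validate': 4, 'verify': 4, 'check': 4,
-- }
-- _CATEGORIES = ["creation", "analysis", "correction",
--                "optimization", "validation", "general_inquiry"]
--
--
-- def _deduce_intent(text, key_concepts):
--     # Single left-to-right scan of the text: at each position, see which
--     # keywords start there and keep the smallest (highest-priority) category
--     # index seen so far, instead of running one substring search per branch.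
--     t = text.lower()
--     best = 5  # index of "general_inquiry"
--     for i in range(len(t)):
--         for kw, pri in _KEYWORD_PRIORITY.items():
--             if pri < best and t.startswith(kw, i):
--                 best = pri
--     result = "User intends " + _CATEGORIES[best]
--     if key_concepts:
--         result += " regarding: " + ", ".join(key_concepts[:3])
--     return result
-- ===== Notes on version B (the rewrite author's own statement) =====
-- stated objective: alternative
-- what changed: Instead of per-branch substring-membership tests, B does one positional scan of the lowered text, matching all keywords at each position via a flat keyword-to-priority table and keeping the minimal priority index, then maps that index to the category name.
import Mathlib
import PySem

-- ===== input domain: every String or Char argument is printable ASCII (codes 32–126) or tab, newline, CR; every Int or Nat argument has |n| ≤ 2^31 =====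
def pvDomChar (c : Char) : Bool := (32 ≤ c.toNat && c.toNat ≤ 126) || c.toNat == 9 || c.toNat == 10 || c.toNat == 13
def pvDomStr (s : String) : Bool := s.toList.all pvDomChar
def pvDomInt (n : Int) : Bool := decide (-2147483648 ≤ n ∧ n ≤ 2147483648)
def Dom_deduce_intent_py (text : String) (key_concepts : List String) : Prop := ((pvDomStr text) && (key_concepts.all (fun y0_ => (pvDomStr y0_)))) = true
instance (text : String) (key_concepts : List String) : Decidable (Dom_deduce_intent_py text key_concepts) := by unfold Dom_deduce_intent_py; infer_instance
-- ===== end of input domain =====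

-- B replaces A's per-branch substring tests by a single positional scan of the
-- lowered text that keeps the minimal priority index of any keyword starting at
-- each position (objective: alternative algorithm, same cost).


-- ===== PORT A =====
def deduce_intent_py (text : String) (key_concepts : List String) : String :=
  let text_lower := PySem.Str.lower text
  let intent_category :=
    if (["create", "build", "make", "generate"].any (fun w => PySem.Str.isIn w text_lower)) then
      "creation"
    else if (["analyze", "examine", "understand", "explain"].any (fun w => PySem.Str.isIn w text_lower)) then
      "analysis"
    else if (["fix", "correct", "debug", "resolve"].any (fun w => PySem.Str.isIn w text_lower)) then
      "correction"
    else if (["optimize", "improve", "enhance", "refine"].any (fun w => PySem.Str.isIn w text_lower)) then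
      "optimization"
    else if (["test", "validate", "verify", "check"].any (fun w => PySem.Str.isIn w text_lower)) then
      "validation"
    else
      "general_inquiry"
  if key_concepts ≠ [] then
    let concepts_str := PySem.Str.join ", " (key_concepts.take 3)
    "User intends " ++ intent_category ++ " regarding: " ++ concepts_str
  else
    "User intends " ++ intent_category

-- ===== PORT B =====
-- flat keyword → priority-index table (_KEYWORD_PRIORITY in Source B)
def pvKeywords : List (List Char × Nat) :=
  [("create".toList, 0), ("build".toList, 0), ("make".toList, 0), ("generate".toList, 0),
   ("analyze".toList, 1), ("examine".toList, 1), ("understand".toList, 1), ("explain".toList, 1),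
   ("fix".toList, 2), ("correct".toList, 2), ("debug".toList, 2), ("resolve".toList, 2),
   ("optimize".toList, 3), ("improve".toList, 3), ("enhance".toList, 3), ("refine".toList, 3),
   ("test".toList, 4), ("validate".toList, 4), ("verify".toList, 4), ("check".toList, 4)]

def pvCategories : List String :=
  ["creation", "analysis", "correction", "optimization", "validation", "general_inquiry"]

-- the scan loop of Source B: for i in range(len(t)): for kw, pri in table: …
-- t.startswith(kw, i) with 0 ≤ i ≤ len(t) is exactly Chars.startswith (t.drop i) kw
def pvScanBest (t : List Char) : Nat :=
  (List.range t.length).foldl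
    (fun best i =>
      pvKeywords.foldl
        (fun b p => if p.2 < b ∧ PySem.Chars.startswith (t.drop i) p.1 = true then p.2 else b)
        best)
    5

def deduce_intent_py_alt (text : String) (key_concepts : List String) : String :=
  let t := (PySem.Str.lower text).toList
  let best := pvScanBest t
  let result := "User intends " ++ pvCategories.getD best ""
  if key_concepts ≠ [] then
    result ++ (" regarding: " ++ PySem.Str.join ", " (key_concepts.take 3))
  else
    result

-- ===== PRECONDITION & SPEC =====
def Spec_deduce_intent_py (text : String) (key_concepts : List String) (out : String) : Prop := out = deduce_intent_py_alt text key_concepts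
instance (text : String) (key_concepts : List String) (out : String) : Decidable (Spec_deduce_intent_py text key_concepts out) := by unfold Spec_deduce_intent_py; infer_instance

-- ===== CLAIM =====
def Claim_equal_deduce_intent_py : Prop := ∀ (text : String) (key_concepts : List String), Dom_deduce_intent_py text key_concepts → Spec_deduce_intent_py text key_concepts (deduce_intent_py text key_concepts)

-- ===== LEMMAS AND PROOFS =====

-- generic facts about folds of shape  b ↦ if g x < b ∧ P x then g x else b
theorem pvFold_le_init {α : Type} (L : List α) (g : α → Nat) (P : α → Prop)
    [DecidablePred P] (b : Nat) :
    L.foldl (fun b x => if g x < b ∧ P x then g x else b) b ≤ b := by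
  induction L generalizing b with
  | nil => simp
  | cons a L ih =>
    simp only [List.foldl_cons]
    refine le_trans (ih _) ?_
    split_ifs <;> omega

theorem pvFold_le_of_mem {α : Type} (L : List α) (g : α → Nat) (P : α → Prop)
    [DecidablePred P] (x : α) (hP : P x) (b : Nat) (hx : x ∈ L) :
    L.foldl (fun b x => if g x < b ∧ P x then g x else b) b ≤ g x := by
  induction L generalizing b with
  | nil => simp at hx
  | cons a L ih =>
    simp only [List.foldl_cons]
    rcases List.mem_cons.1 hx with h | h
    · subst h
      refine le_trans (pvFold_le_init _ _ _ _) ?_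
      split_ifs with h'
      · exact le_rfl
      · have : ¬ g x < b := fun hlt => h' ⟨hlt, hP⟩
        omega
    · exact ih _ h

theorem pvFold_mem {α : Type} (L : List α) (g : α → Nat) (P : α → Prop)
    [DecidablePred P] (b : Nat) :
    L.foldl (fun b x => if g x < b ∧ P x then g x else b) b = b ∨
      ∃ x ∈ L, P x ∧ L.foldl (fun b x => if g x < b ∧ P x then g x else b) b = g x := by
  induction L generalizing b with
  | nil => exact Or.inl rfl
  | cons a L ih =>
    simp only [List.foldl_cons]
    rcases ih (if g a < b ∧ P a then g a else b) with h | ⟨x, hx, hPx, hval⟩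
    · rw [h]
      split_ifs with h'
      · exact Or.inr ⟨a, List.mem_cons_self, h'.2, rfl⟩
      · exact Or.inl rfl
    · exact Or.inr ⟨x, List.mem_cons_of_mem _ hx, hPx, hval⟩

-- outer-fold versions for the nested scan
theorem pvScan_le_init (t : List Char) (L : List Nat) (b : Nat) :
    L.foldl
      (fun best i => pvKeywords.foldl
        (fun b p => if p.2 < b ∧ PySem.Chars.startswith (t.drop i) p.1 = true then p.2 else b)
        best) b ≤ b := by
  induction L generalizing b with
  | nil => simp
  | cons i L ih =>
    simp only [List.foldl_cons]
    exact le_trans (ih _) (pvFold_le_init _ _ _ _)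

theorem pvScan_le_of_mem (t : List Char) (L : List Nat) (i : Nat)
    (p : List Char × Nat) (hp : p ∈ pvKeywords)
    (hs : PySem.Chars.startswith (t.drop i) p.1 = true) (b : Nat) (hi : i ∈ L) :
    L.foldl
      (fun best i => pvKeywords.foldl
        (fun b p => if p.2 < b ∧ PySem.Chars.startswith (t.drop i) p.1 = true then p.2 else b)
        best) b ≤ p.2 := by
  induction L generalizing b with
  | nil => simp at hi
  | cons j L ih =>
    simp only [List.foldl_cons]
    rcases List.mem_cons.1 hi with h | h
    · subst h
      exact le_trans (pvScan_le_init t L _) (pvFold_le_of_mem _ _ _ p hs _ hp)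
    · exact ih _ h

theorem pvScan_mem (t : List Char) (L : List Nat) (b : Nat) :
    L.foldl
      (fun best i => pvKeywords.foldl
        (fun b p => if p.2 < b ∧ PySem.Chars.startswith (t.drop i) p.1 = true then p.2 else b)
        best) b = b ∨
    ∃ i ∈ L, ∃ p ∈ pvKeywords, PySem.Chars.startswith (t.drop i) p.1 = true ∧
      L.foldl
        (fun best i => pvKeywords.foldl
          (fun b p => if p.2 < b ∧ PySem.Chars.startswith (t.drop i) p.1 = true then p.2 else b)
          best) b = p.2 := by
  induction L generalizing b with
  | nil => exact Or.inl rfl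
  | cons j L ih =>
    simp only [List.foldl_cons]
    rcases ih (pvKeywords.foldl
        (fun b p => if p.2 < b ∧ PySem.Chars.startswith (t.drop j) p.1 = true then p.2 else b) b)
      with h | ⟨i, hi, p, hp, hs, hval⟩
    · rw [h]
      rcases pvFold_mem pvKeywords Prod.snd
          (fun p => PySem.Chars.startswith (t.drop j) p.1 = true) b with h' | ⟨p, hp, hPp, hval⟩
      · exact Or.inl h'
      · exact Or.inr ⟨j, List.mem_cons_self, p, hp, hPp, hval⟩
    · exact Or.inr ⟨i, List.mem_cons_of_mem _ hi, p, hp, hs, hval⟩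

-- occurrence of a keyword anywhere in t bounds the scan result
theorem pvScanBest_le (t : List Char) (p : List Char × Nat) (hp : p ∈ pvKeywords)
    (hin : PySem.Chars.isIn p.1 t = true) : pvScanBest t ≤ p.2 := by
  have hne : p.1 ≠ [] := by fin_cases hp <;> decide
  obtain ⟨j, hj⟩ := (PySem.Chars.exists_prefix_drop_iff_isIn p.1 t).2 hin
  have hjlt : j < t.length := by
    by_contra h
    have : t.drop j = [] := List.drop_eq_nil_of_le (by omega)
    rw [this] at hj
    exact hne (List.prefix_nil.1 hj)
  exact pvScan_le_of_mem t _ j p hp ((PySem.Chars.startswith_iff _ _).2 hj) 5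
    (List.mem_range.2 hjlt)

-- the scan result is 5 or the priority of some keyword occurring in t
theorem pvScanBest_cases (t : List Char) :
    pvScanBest t = 5 ∨
      ∃ p ∈ pvKeywords, PySem.Chars.isIn p.1 t = true ∧ pvScanBest t = p.2 := by
  rcases pvScan_mem t (List.range t.length) 5 with h | ⟨i, _, p, hp, hs, hval⟩
  · exact Or.inl h
  · refine Or.inr ⟨p, hp, ?_, hval⟩
    exact (PySem.Chars.exists_prefix_drop_iff_isIn p.1 t).1
      ⟨i, (PySem.Chars.startswith_iff _ _).1 hs⟩

-- bounds per keyword group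
theorem pvHit0 (t : List Char)
    (h : (["create", "build", "make", "generate"].any (fun w => PySem.Chars.isIn w.toList t)) = true) :
    pvScanBest t ≤ 0 := by
  rcases List.any_eq_true.mp h with ⟨w, hw, hiw⟩
  fin_cases hw
  · exact pvScanBest_le t ("create".toList, 0) (by decide) hiw
  · exact pvScanBest_le t ("build".toList, 0) (by decide) hiw
  · exact pvScanBest_le t ("make".toList, 0) (by decide) hiw
  · exact pvScanBest_le t ("generate".toList, 0) (by decide) hiw

theorem pvHit1 (t : List Char)
    (h : (["analyze", "examine", "understand", "explain"].any (fun w => PySem.Chars.isIn w.toList t)) = true) :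
    pvScanBest t ≤ 1 := by
  rcases List.any_eq_true.mp h with ⟨w, hw, hiw⟩
  fin_cases hw
  · exact pvScanBest_le t ("analyze".toList, 1) (by decide) hiw
  · exact pvScanBest_le t ("examine".toList, 1) (by decide) hiw
  · exact pvScanBest_le t ("understand".toList, 1) (by decide) hiw
  · exact pvScanBest_le t ("explain".toList, 1) (by decide) hiw

theorem pvHit2 (t : List Char)
    (h : (["fix", "correct", "debug", "resolve"].any (fun w => PySem.Chars.isIn w.toList t)) = true) :
    pvScanBest t ≤ 2 := by
  rcases List.any_eq_true.mp h with ⟨w, hw, hiw⟩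
  fin_cases hw
  · exact pvScanBest_le t ("fix".toList, 2) (by decide) hiw
  · exact pvScanBest_le t ("correct".toList, 2) (by decide) hiw
  · exact pvScanBest_le t ("debug".toList, 2) (by decide) hiw
  · exact pvScanBest_le t ("resolve".toList, 2) (by decide) hiw

theorem pvHit3 (t : List Char)
    (h : (["optimize", "improve", "enhance", "refine"].any (fun w => PySem.Chars.isIn w.toList t)) = true) :
    pvScanBest t ≤ 3 := by
  rcases List.any_eq_true.mp h with ⟨w, hw, hiw⟩
  fin_cases hw
  · exact pvScanBest_le t ("optimize".toList, 3) (by decide) hiw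
  · exact pvScanBest_le t ("improve".toList, 3) (by decide) hiw
  · exact pvScanBest_le t ("enhance".toList, 3) (by decide) hiw
  · exact pvScanBest_le t ("refine".toList, 3) (by decide) hiw

theorem pvHit4 (t : List Char)
    (h : (["test", "validate", "verify", "check"].any (fun w => PySem.Chars.isIn w.toList t)) = true) :
    pvScanBest t ≤ 4 := by
  rcases List.any_eq_true.mp h with ⟨w, hw, hiw⟩
  fin_cases hw
  · exact pvScanBest_le t ("test".toList, 4) (by decide) hiw
  · exact pvScanBest_le t ("validate".toList, 4) (by decide) hiw
  · exact pvScanBest_le t ("verify".toList, 4) (by decide) hiw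
  · exact pvScanBest_le t ("check".toList, 4) (by decide) hiw

-- the scan result together with the group condition it came from
theorem pvScanBest_cases' (t : List Char) :
    pvScanBest t = 5 ∨
    (pvScanBest t = 0 ∧ (["create", "build", "make", "generate"].any (fun w => PySem.Chars.isIn w.toList t)) = true) ∨
    (pvScanBest t = 1 ∧ (["analyze", "examine", "understand", "explain"].any (fun w => PySem.Chars.isIn w.toList t)) = true) ∨
    (pvScanBest t = 2 ∧ (["fix", "correct", "debug", "resolve"].any (fun w => PySem.Chars.isIn w.toList t)) = true) ∨
    (pvScanBest t = 3 ∧ (["optimize", "improve", "enhance", "refine"].any (fun w => PySem.Chars.isIn w.toList t)) = true) ∨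
    (pvScanBest t = 4 ∧ (["test", "validate", "verify", "check"].any (fun w => PySem.Chars.isIn w.toList t)) = true) := by
  rcases pvScanBest_cases t with h | ⟨p, hp, hin, hval⟩
  · exact Or.inl h
  · fin_cases hp <;> simp_all

-- the scan equals A's first-match chain
theorem pvScanBest_eq_chain (t : List Char) :
    pvScanBest t =
      if (["create", "build", "make", "generate"].any (fun w => PySem.Chars.isIn w.toList t)) then 0
      else if (["analyze", "examine", "understand", "explain"].any (fun w => PySem.Chars.isIn w.toList t)) then 1
      else if (["fix", "correct", "debug", "resolve"].any (fun w => PySem.Chars.isIn w.toList t)) then 2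
      else if (["optimize", "improve", "enhance", "refine"].any (fun w => PySem.Chars.isIn w.toList t)) then 3
      else if (["test", "validate", "verify", "check"].any (fun w => PySem.Chars.isIn w.toList t)) then 4
      else 5 := by
  rcases pvScanBest_cases' t with h | ⟨hv, hc⟩ | ⟨hv, hc⟩ | ⟨hv, hc⟩ | ⟨hv, hc⟩ | ⟨hv, hc⟩ <;>
    split_ifs with h1 h2 h3 h4 h5 <;>
    first
      | assumption
      | contradiction
      | (have := pvHit0 t h1; omega)
      | (have := pvHit1 t h2; omega)
      | (have := pvHit2 t h3; omega)
      | (have := pvHit3 t h4; omega)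
      | (have := pvHit4 t h5; omega)

-- ===== VERDICT =====
theorem deduce_intent_py_spec : Claim_equal_deduce_intent_py := by
  intro text key_concepts _
  unfold Spec_deduce_intent_py deduce_intent_py deduce_intent_py_alt
  simp only [pvScanBest_eq_chain, PySem.Str.isIn_eq, pvCategories]
  split_ifs <;> simp [String.append_assoc] <;> (rw [← String.append_assoc]; rfl)
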